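-- pv_equiv track=rewrite | github.com/aryanjha205/SkillMap | routes/job_routes.py | _active_customer_job
-- ===== SOURCE A (Python) =====
-- ACTIVE_STATUSES = {"Pending", "Accepted", "On the Way", "Reached", "Completed"}
--
-- STATUS_PRIORITY = {
--     "Accepted": 0,
--     "On the Way": 1,
--     "Reached": 2,
--     "Completed": 3,
--     "Pending": 4,
--     "Rejected": 5,
--     "Cancelled": 6,
--     "Expired": 7,
--     "Paid": 8,
-- }
--
-- def _active_customer_job(jobs):
--     if not jobs:
--         return None
--     active_jobs = [job for job in jobs if job.get("status") in ACTIVE_STATUSES]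
--     if not active_jobs:
--         return None
--     return sorted(
--         active_jobs,
--         key=lambda job: (
--             STATUS_PRIORITY.get(job.get("status"), 99),
--             job.get("created_at", ""),
--         ),
--     )[0]
-- ===== SOURCE B (Python) =====
-- # Priority order doubles as the source of both tables: the first five
-- # statuses of the ranking are exactly the active ones.
-- _PRIORITY_ORDER = ["Accepted", "On the Way", "Reached", "Completed", "Pending",
--                    "Rejected", "Cancelled", "Expired", "Paid"]
-- STATUS_PRIORITY = {s: i for i, s in enumerate(_PRIORITY_ORDER)}
-- ACTIVE_STATUSES = set(_PRIORITY_ORDER[:5])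
--
--
-- def _priority(job):
--     return STATUS_PRIORITY.get(job.get("status"), 99)
--
--
-- def _active_customer_job(jobs):
--     # staged decomposition: filter actives, find the best status tier p,
--     # then pick the earliest created_at within that tier (first wins on ties).
--     active = [job for job in jobs if job.get("status") in ACTIVE_STATUSES]
--     if not active:
--         return None
--     p = min(_priority(job) for job in active)
--     tier = [job for job in active if _priority(job) == p]
--     best = tier[0]
--     for job in tier[1:]:
--         if job.get("created_at", "") < best.get("created_at", ""):
--             best = job
--     return best
-- ===== Notes on version B (the rewrite author's own statement) =====
-- stated objective: alternative
-- what changed: Replaces filter-then-stable-sort-and-take-head with a staged selection: filter actives, one pass computing the minimum status priority, filter that tier, then one pass picking the earliest created_at (first wins on ties).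
import Mathlib
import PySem

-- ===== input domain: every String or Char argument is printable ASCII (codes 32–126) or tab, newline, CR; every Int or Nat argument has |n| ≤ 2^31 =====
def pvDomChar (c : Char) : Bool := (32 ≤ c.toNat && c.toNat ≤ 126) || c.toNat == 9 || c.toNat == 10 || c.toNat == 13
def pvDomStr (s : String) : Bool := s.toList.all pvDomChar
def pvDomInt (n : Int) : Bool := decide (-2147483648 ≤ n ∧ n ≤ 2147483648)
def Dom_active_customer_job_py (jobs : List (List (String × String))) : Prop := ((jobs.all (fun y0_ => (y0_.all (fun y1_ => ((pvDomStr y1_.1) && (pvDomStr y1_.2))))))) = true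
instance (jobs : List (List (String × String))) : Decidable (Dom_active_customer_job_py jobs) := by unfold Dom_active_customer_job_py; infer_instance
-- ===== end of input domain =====

-- B replaces A's filter + stable sort + head with a staged selection (best priority
-- tier first, then earliest created_at inside the tier); same return value, proved equal.

-- shared module constants (jobs are assoc lists; lookup = first match)
def pvActiveStatuses : List String := ["Pending", "Accepted", "On the Way", "Reached", "Completed"]

def pvStatusPriority : List (String × Int) :=
  [("Accepted", 0), ("On the Way", 1), ("Reached", 2), ("Completed", 3), ("Pending", 4),
   ("Rejected", 5), ("Cancelled", 6), ("Expired", 7), ("Paid", 8)]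

-- ===== PORT A =====
def pvGet (d : List (String × String)) (k : String) : Option String :=
  (d.find? (fun p => p.1 == k)).map (·.2)

-- job.get("status") in ACTIVE_STATUSES  (None is never in the set)
def pvIsActive (job : List (String × String)) : Bool :=
  match pvGet job "status" with
  | some s => pvActiveStatuses.contains s
  | none => false

-- STATUS_PRIORITY.get(job.get("status"), 99)
def pvPrio (job : List (String × String)) : Int :=
  match pvGet job "status" with
  | some s =>
    match pvStatusPriority.find? (fun p => p.1 == s) with
    | some p => p.2
    | none => 99
  | none => 99

-- job.get("created_at", "")
def pvCreated (job : List (String × String)) : String := (pvGet job "created_at").getD ""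

-- Python's tuple key (prio, created_at) compared lexicographically: Lex (Int × String)
def pvKey (job : List (String × String)) : Int ×ₗ String := toLex (pvPrio job, pvCreated job)

def active_customer_job_py (jobs : List (List (String × String))) : Option (List (String × String)) :=
  if jobs = [] then none
  else
    let active := jobs.filter pvIsActive
    if active = [] then none
    else PySem.List.pyGet? (PySem.List.sorted active pvKey false) 0

-- ===== PORT B =====
-- B reads the dicts through List.lookup (first match, like dict.get)
def pvActiveB (job : List (String × String)) : Bool :=
  ((job.lookup "status").map (fun s => pvActiveStatuses.contains s)).getD false

def pvPrioB (job : List (String × String)) : Int :=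
  ((job.lookup "status").bind (fun s => pvStatusPriority.lookup s)).getD 99

def pvCreatedB (job : List (String × String)) : String := (job.lookup "created_at").getD ""

def active_customer_job_py_alt (jobs : List (List (String × String))) : Option (List (String × String)) :=
  match jobs.filter pvActiveB with
  | [] => none
  | h :: t =>
    -- p = min(priority over the active jobs); Python's min replaces on strict '<'
    let p := t.foldl (fun m j => if pvPrioB j < m then pvPrioB j else m) (pvPrioB h)
    match (h :: t).filter (fun j => pvPrioB j == p) with
    | [] => none  -- unreachable: p is attained by some active job
    | b0 :: rest =>
      some (rest.foldl (fun best j => if pvCreatedB j < pvCreatedB best then j else best) b0)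

-- ===== PRECONDITION & SPEC =====
def Spec_active_customer_job_py (jobs : List (List (String × String))) (out : Option (List (String × String))) : Prop := out = active_customer_job_py_alt jobs
instance (jobs : List (List (String × String))) (out : Option (List (String × String))) : Decidable (Spec_active_customer_job_py jobs out) := by unfold Spec_active_customer_job_py; infer_instance

-- ===== CLAIM (what is proved, stated in full; the proofs are below) =====
def Claim_equal_active_customer_job_py : Prop := ∀ (jobs : List (List (String × String))), Dom_active_customer_job_py jobs → Spec_active_customer_job_py jobs (active_customer_job_py jobs)

-- ===== LEMMAS AND PROOFS =====

-- ---- bridges between A's find?-based and B's lookup-based dict reads ----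
theorem pvLookup_eq_find {ν : Type} (d : List (String × ν)) (k : String) :
    d.lookup k = (d.find? (fun p => p.1 == k)).map (·.2) := by
  induction d with
  | nil => rfl
  | cons p t ih =>
    by_cases hp : p.1 = k
    · simp [List.lookup, List.find?, hp]
    · have h1 : (p.1 == k) = false := beq_eq_false_iff_ne.mpr hp
      have h2 : (k == p.1) = false := beq_eq_false_iff_ne.mpr (Ne.symm hp)
      simp [List.lookup, List.find?, h1, h2, ih]

theorem pvActiveB_eq (job : List (String × String)) : pvActiveB job = pvIsActive job := by
  unfold pvActiveB pvIsActive
  rw [pvLookup_eq_find]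
  cases h : job.find? (fun p => p.1 == "status") <;> simp [pvGet, h]

theorem pvPrioB_eq (job : List (String × String)) : pvPrioB job = pvPrio job := by
  unfold pvPrioB pvPrio
  rw [pvLookup_eq_find]
  cases h : job.find? (fun p => p.1 == "status") with
  | none => simp [pvGet, h]
  | some q =>
    simp only [pvGet, h, Option.map_some, Option.bind_some]
    rw [pvLookup_eq_find]
    cases pvStatusPriority.find? (fun r => r.1 == q.2) <;> simp

theorem pvCreatedB_eq (job : List (String × String)) : pvCreatedB job = pvCreated job := by
  unfold pvCreatedB pvCreated pvGet
  rw [pvLookup_eq_find]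

-- ---- generic running-minimum machinery (used on both sides) ----
def pvRmin {α κ : Type} [LinearOrder κ] (f : α → κ) (b : α) (l : List α) : α :=
  l.foldl (fun b x => if f x < f b then x else b) b

def pvFmin {α κ : Type} [LinearOrder κ] (f : α → κ) (b : α) (l : List α) : κ :=
  l.foldl (fun m x => min (f x) m) (f b)

theorem pvIte_eq_min {α κ : Type} [LinearOrder κ] (f : α → κ) (x b : α) :
    f (if f x < f b then x else b) = min (f x) (f b) := by
  split_ifs with h
  · exact (min_eq_left h.le).symm
  · exact (min_eq_right (le_of_not_gt h)).symm

theorem pvFmin_cons {α κ : Type} [LinearOrder κ] (f : α → κ) (b x : α) (l : List α) :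
    pvFmin f b (x :: l) = pvFmin f (if f x < f b then x else b) l := by
  simp [pvFmin, pvIte_eq_min]

theorem pvF_rmin {α κ : Type} [LinearOrder κ] (f : α → κ) (l : List α) (b : α) :
    f (pvRmin f b l) = pvFmin f b l := by
  induction l generalizing b with
  | nil => rfl
  | cons x t ih => rw [pvFmin_cons]; exact ih _

theorem pvFoldl_min_le {α κ : Type} [LinearOrder κ] (f : α → κ) (l : List α) (a : κ) :
    l.foldl (fun m x => min (f x) m) a ≤ a := by
  induction l generalizing a with
  | nil => exact le_refl a
  | cons x t ih => exact le_trans (ih (min (f x) a)) (min_le_right _ _)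

theorem pvFmin_le_head {α κ : Type} [LinearOrder κ] (f : α → κ) (b : α) (l : List α) :
    pvFmin f b l ≤ f b := pvFoldl_min_le f l (f b)

theorem pvFmin_le_mem {α κ : Type} [LinearOrder κ] (f : α → κ) (l : List α) (b x : α)
    (hx : x ∈ b :: l) : pvFmin f b l ≤ f x := by
  induction l generalizing b with
  | nil => simp at hx; subst hx; exact le_refl _
  | cons y t ih =>
    rw [pvFmin_cons]
    have hite : f (if f y < f b then y else b) = min (f y) (f b) := pvIte_eq_min f y b
    rcases List.mem_cons.mp hx with rfl | hx'
    · exact le_trans (pvFmin_le_head f _ t) (by rw [hite]; exact min_le_right _ _)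
    · rcases List.mem_cons.mp hx' with rfl | hx''
      · exact le_trans (pvFmin_le_head f _ t) (by rw [hite]; exact min_le_left _ _)
      · exact ih _ (List.mem_cons_of_mem _ hx'')

theorem pvRmin_mem {α κ : Type} [LinearOrder κ] (f : α → κ) (l : List α) (b : α) :
    pvRmin f b l ∈ b :: l := by
  induction l generalizing b with
  | nil => simp [pvRmin]
  | cons x t ih =>
    have h := ih (if f x < f b then x else b)
    rcases List.mem_cons.mp h with he | ht
    · rw [pvRmin, List.foldl_cons, ← pvRmin, he]
      split_ifs <;> simp
    · rw [pvRmin, List.foldl_cons, ← pvRmin]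
      exact List.mem_cons_of_mem _ (List.mem_cons_of_mem _ ht)

-- the running minimum is the FIRST element attaining the minimum f-value
theorem pvFind_rmin {α κ : Type} [LinearOrder κ] (f : α → κ) (l : List α) (b : α) :
    (b :: l).find? (fun x => decide (f x = pvFmin f b l)) = some (pvRmin f b l) := by
  induction l generalizing b with
  | nil => simp [pvFmin, pvRmin]
  | cons x t ih =>
    rw [pvFmin_cons, pvRmin, List.foldl_cons, ← pvRmin]
    set b' := if f x < f b then x else b with hb'
    by_cases h : f x < f b
    · -- b is skipped: its value is strictly above the minimum
      have hb'x : b' = x := by rw [hb', if_pos h]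
      rw [hb'x]
      have hne : ¬ f b = pvFmin f x t := by
        intro he
        have hle : pvFmin f x t ≤ f x := pvFmin_le_head f x t
        rw [← he] at hle
        exact absurd h (not_lt.mpr hle)
      rw [List.find?_cons_of_neg (by simpa using hne)]
      exact ih x
    · have hb'b : b' = b := by rw [hb', if_neg h]
      rw [hb'b]
      by_cases hm : f b = pvFmin f b t
      · rw [List.find?_cons_of_pos (by simpa using hm)]
        have h5 := ih b
        rw [List.find?_cons_of_pos (by simpa using hm)] at h5
        exact h5
      · have hlt : pvFmin f b t < f b := lt_of_le_of_ne (pvFmin_le_head f b t) (fun he => hm he.symm)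
        have hnex : ¬ f x = pvFmin f b t := fun he =>
          absurd (lt_of_lt_of_le hlt (le_of_not_gt h)) (by rw [he]; exact lt_irrefl _)
        rw [List.find?_cons_of_neg (by simpa using hm),
            List.find?_cons_of_neg (by simpa using hnex)]
        have h5 := ih b
        rw [List.find?_cons_of_neg (by simpa using hm)] at h5
        exact h5

-- ---- A's sorted-head as a single running-minimum pass ----
def pvKeyLt (a b : Int × String) : Bool := a.1 < b.1 || (a.1 == b.1 && a.2 < b.2)

def pvStep (best : Option ((Int × String) × List (String × String)))
    (job : List (String × String)) : Option ((Int × String) × List (String × String)) :=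
  if pvIsActive job then
    let k := (pvPrio job, pvCreated job)
    match best with
    | none => some (k, job)
    | some (bk, bj) => if pvKeyLt k bk then some (k, job) else some (bk, bj)
  else best

def pvPack (h : Option (List (String × String))) : Option ((Int × String) × List (String × String)) :=
  h.map (fun j => ((pvPrio j, pvCreated j), j))

theorem pvKeyLt_eq (x y : List (String × String)) :
    pvKeyLt (pvPrio x, pvCreated x) (pvPrio y, pvCreated y) = decide (pvKey x < pvKey y) := by
  simp [pvKeyLt, pvKey, Prod.Lex.lt_iff, Bool.beq_eq_decide_eq]

theorem pvPack_insertBy (x : List (String × String)) (hx : pvIsActive x = true)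
    (acc : List (List (String × String))) :
    pvPack (PySem.List.insertBy (fun a b => decide (pvKey a < pvKey b)) x acc).head? =
      pvStep (pvPack acc.head?) x := by
  cases acc with
  | nil => simp [PySem.List.insertBy, pvPack, pvStep, hx]
  | cons y t =>
    simp only [PySem.List.insertBy, pvPack, pvStep, hx, if_true, ← pvKeyLt_eq]
    cases h : pvKeyLt (pvPrio x, pvCreated x) (pvPrio y, pvCreated y) <;> simp [h]

theorem pvMain (ys : List (List (String × String)))
    (hys : ∀ x ∈ ys, pvIsActive x = true) (acc : List (List (String × String))) :
    pvPack (ys.foldl (fun a x => PySem.List.insertBy (fun a b => decide (pvKey a < pvKey b)) x a) acc).head? =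
      ys.foldl pvStep (pvPack acc.head?) := by
  induction ys generalizing acc with
  | nil => rfl
  | cons x ys ih =>
    simp only [List.foldl_cons]
    rw [ih (fun z hz => hys z (by simp [hz])), pvPack_insertBy x (hys x (by simp)) acc]

-- on an all-active list, the pvStep fold is exactly the running lex-minimum
theorem pvStepFold (t : List (List (String × String)))
    (ht : ∀ x ∈ t, pvIsActive x = true) (b : List (String × String)) :
    t.foldl pvStep (some ((pvPrio b, pvCreated b), b)) =
      some ((pvPrio (pvRmin pvKey b t), pvCreated (pvRmin pvKey b t)), pvRmin pvKey b t) := by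
  induction t generalizing b with
  | nil => rfl
  | cons x xs ih =>
    have hx : pvIsActive x = true := ht x (by simp)
    rw [List.foldl_cons]
    have hstep : pvStep (some ((pvPrio b, pvCreated b), b)) x =
        some ((pvPrio (if pvKey x < pvKey b then x else b),
               pvCreated (if pvKey x < pvKey b then x else b)),
              if pvKey x < pvKey b then x else b) := by
      simp only [pvStep, hx, if_true, pvKeyLt_eq]
      by_cases h : pvKey x < pvKey b <;> simp [h]
    rw [hstep, ih (fun z hz => ht z (by simp [hz]))]
    rfl

-- A's result, written as the running-minimum fold over the active jobs
theorem pvA_run (jobs : List (List (String × String))) :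
    active_customer_job_py jobs = ((jobs.filter pvIsActive).foldl pvStep none).map (·.2) := by
  unfold active_customer_job_py
  by_cases hnil : jobs = []
  · simp [hnil]
  · simp only [hnil, if_false]
    by_cases hact : jobs.filter pvIsActive = []
    · simp [hact]
    · simp only [hact, if_false]
      have := pvMain (jobs.filter pvIsActive)
        (fun x hx => List.of_mem_filter hx) []
      simp only [List.head?_nil, pvPack, Option.map_none] at this
      rw [PySem.List.sorted_eq_foldl_insertBy, PySem.List.pyGet?_zero, ← this]
      cases h : ((jobs.filter pvIsActive).foldl
          (fun a x => PySem.List.insertBy (fun a b => decide (pvKey a < pvKey b)) x a) []).head? <;>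
        simp [h, ← List.head?_eq_getElem?]

theorem active_customer_job_py_spec : Claim_equal_active_customer_job_py := by
  intro jobs _
  unfold Spec_active_customer_job_py
  rw [pvA_run]
  have hfilter : jobs.filter pvActiveB = jobs.filter pvIsActive := by
    apply List.filter_congr; intro x _; exact pvActiveB_eq x
  cases hact : jobs.filter pvIsActive with
  | nil => unfold active_customer_job_py_alt; rw [hfilter, hact]; simp
  | cons h t =>
    have hmemact : ∀ x ∈ h :: t, pvIsActive x = true := by
      intro x hx; exact List.of_mem_filter (hact ▸ hx)
    -- A side: running lex minimum
    have hA : ((h :: t).foldl pvStep none).map (·.2) = some (pvRmin pvKey h t) := by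
      rw [List.foldl_cons, show pvStep none h = some ((pvPrio h, pvCreated h), h) by
            simp [pvStep, hmemact h (by simp)],
          pvStepFold t (fun x hx => hmemact x (by simp [hx])) h]
      rfl
    rw [hA]
    -- B side: the priority fold is pvFmin
    have hp : t.foldl (fun m j => if pvPrioB j < m then pvPrioB j else m) (pvPrioB h) =
        pvFmin pvPrio h t := by
      rw [pvPrioB_eq h]
      unfold pvFmin
      apply PySem.List.foldl_congr_mem
      intro m j _
      rw [pvPrioB_eq]
      split_ifs with hlt
      · exact (min_eq_left hlt.le).symm
      · exact (min_eq_right (le_of_not_gt hlt)).symm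
    set p := pvFmin pvPrio h t with hpdef
    have htier : (h :: t).filter (fun j => pvPrioB j == p) =
        (h :: t).filter (fun j => decide (pvPrio j = p)) := by
      apply List.filter_congr; intro x _
      rw [pvPrioB_eq]
      rfl
    have halt : active_customer_job_py_alt jobs =
        match (h :: t).filter (fun j => decide (pvPrio j = p)) with
        | [] => none
        | b0 :: rest =>
          some (rest.foldl (fun best j => if pvCreatedB j < pvCreatedB best then j else best) b0) := by
      unfold active_customer_job_py_alt
      rw [hfilter, hact]
      simp only [hp, htier]
    rw [halt]
    -- the tier is nonempty: p is attained by the running prio-minimum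
    have hs : pvRmin pvPrio h t ∈ (h :: t).filter (fun j => decide (pvPrio j = p)) :=
      List.mem_filter.mpr ⟨pvRmin_mem pvPrio t h, by simp [pvF_rmin, hpdef]⟩
    cases htl : (h :: t).filter (fun j => decide (pvPrio j = p)) with
    | nil => rw [htl] at hs; simp at hs
    | cons b0 rest =>
      show some (pvRmin pvKey h t) =
        some (rest.foldl (fun best j => if pvCreatedB j < pvCreatedB best then j else best) b0)
      -- B's created_at fold is the running created-minimum over the tier
      have hB : rest.foldl (fun best j => if pvCreatedB j < pvCreatedB best then j else best) b0 =
          pvRmin pvCreated b0 rest := by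
        unfold pvRmin
        apply PySem.List.foldl_congr_mem
        intro b j _
        rw [pvCreatedB_eq, pvCreatedB_eq]
      rw [hB]
      -- identify the two picks via the first-minimum characterisation
      set r := pvRmin pvKey h t with hrdef
      set w := pvRmin pvCreated b0 rest with hwdef
      set c := pvFmin pvCreated b0 rest with hcdef
      have hr_mem : r ∈ h :: t := pvRmin_mem pvKey t h
      have hw_tier : w ∈ b0 :: rest := pvRmin_mem pvCreated rest b0
      have hw_mem : w ∈ h :: t := List.mem_of_mem_filter (htl ▸ hw_tier)
      have hw_prio : pvPrio w = p := by
        have := List.of_mem_filter (htl ▸ hw_tier)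
        simpa using this
      have hw_created : pvCreated w = c := pvF_rmin pvCreated rest b0
      have hKr : pvKey r = pvFmin pvKey h t := pvF_rmin pvKey t h
      -- prio of r equals p
      have hr_prio : pvPrio r = p := by
        have h1 : p ≤ pvPrio r := pvFmin_le_mem pvPrio t h r hr_mem
        have h2 : pvKey r ≤ pvKey (pvRmin pvPrio h t) := by
          rw [hKr]; exact pvFmin_le_mem pvKey t h _ (pvRmin_mem pvPrio t h)
        have h3 : pvPrio (pvRmin pvPrio h t) = p := pvF_rmin pvPrio t h
        have h4 : pvPrio r ≤ p := by
          rcases Prod.Lex.toLex_le_toLex.mp h2 with hlt | ⟨heq, _⟩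
          · exact le_of_lt (h3 ▸ hlt)
          · exact le_of_eq (h3 ▸ heq)
        exact le_antisymm h4 h1
      have hr_tier : r ∈ b0 :: rest := by
        rw [← htl]; exact List.mem_filter.mpr ⟨hr_mem, by simp [hr_prio]⟩
      -- created of r equals c
      have hr_created : pvCreated r = c := by
        have h1 : c ≤ pvCreated r := pvFmin_le_mem pvCreated rest b0 r hr_tier
        have h2 : pvKey r ≤ pvKey w := by rw [hKr]; exact pvFmin_le_mem pvKey t h w hw_mem
        have h4 : pvCreated r ≤ c := by
          rcases Prod.Lex.toLex_le_toLex.mp h2 with hlt | ⟨_, hle⟩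
          · exact absurd (hw_prio ▸ hlt) (by simp [hr_prio])
          · exact hw_created ▸ hle
        exact le_antisymm h4 h1
      -- both are the first element of the tier whose created_at equals c
      have hMA : pvFmin pvKey h t = toLex (p, c) := by
        rw [← hKr]; simp [pvKey, hr_prio, hr_created]
      have hfindA : (h :: t).find? (fun x => decide (pvKey x = pvFmin pvKey h t)) = some r :=
        pvFind_rmin pvKey t h
      have hfindB : (b0 :: rest).find? (fun x => decide (pvCreated x = c)) = some w :=
        pvFind_rmin pvCreated rest b0
      have hpred : (fun x => decide (pvKey x = pvFmin pvKey h t)) =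
          (fun x => decide (decide (pvPrio x = p) = true ∧ decide (pvCreated x = c) = true)) := by
        funext x
        rw [hMA]
        simp only [decide_eq_true_eq]
        rw [decide_eq_decide]
        simp [pvKey, Prod.ext_iff]
      rw [hpred, ← List.find?_filter, htl, hfindB] at hfindA
      exact congrArg some (Option.some.inj hfindA).symm
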